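-- pv_equiv track=rewrite | github.com/eajnoeyeel/didactic-octo-telegram | mlp/lambdas/register/handler.py | validate_description
-- ===== SOURCE A (Python) =====
-- MAX_DESCRIPTION_LENGTH = 2000
--
-- INJECTION_PATTERNS = [
--     "ignore previous",
--     "ignore above",
--     "system:",
--     "[inst]",
--     "you are now",
--     "forget everything",
--     "<|im_start|>",
--     "do not follow",
--     "disregard",
--     "override",
-- ]
--
-- def validate_description(desc: str) -> str | None:
--     """Return error message if invalid, None if OK."""
--     if len(desc) > MAX_DESCRIPTION_LENGTH:
--         return f"Description exceeds {MAX_DESCRIPTION_LENGTH} character limit"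
--     lower = desc.lower()
--     for pattern in INJECTION_PATTERNS:
--         if pattern in lower:
--             return "Description contains prohibited pattern"
--     return None
-- ===== SOURCE B (Python) =====
-- MAX_DESCRIPTION_LENGTH = 2000
--
-- INJECTION_PATTERNS = [
--     "ignore previous",
--     "ignore above",
--     "system:",
--     "[inst]",
--     "you are now",
--     "forget everything",
--     "<|im_start|>",
--     "do not follow",
--     "disregard",
--     "override",
-- ]
--
-- _PATTERNS = tuple(INJECTION_PATTERNS)
--
-- def validate_description(desc: str) -> str | None:
--     """Return error message if invalid, None if OK."""
--     if len(desc) > MAX_DESCRIPTION_LENGTH: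
--         return f"Description exceeds {MAX_DESCRIPTION_LENGTH} character limit"
--     lower = desc.lower()
--     # single left-to-right pass over positions instead of one full scan per pattern
--     if any(lower.startswith(_PATTERNS, i) for i in range(len(lower))):
--         return "Description contains prohibited pattern"
--     return None
-- ===== Notes on version B (the rewrite author's own statement) =====
-- stated objective: alternative
-- what changed: Replaces the per-pattern substring-membership loop (one full scan of the text per pattern) by a single left-to-right pass over text positions, checking at each position whether any pattern starts there via one startswith call with the pattern tuple.
import Mathlib
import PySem

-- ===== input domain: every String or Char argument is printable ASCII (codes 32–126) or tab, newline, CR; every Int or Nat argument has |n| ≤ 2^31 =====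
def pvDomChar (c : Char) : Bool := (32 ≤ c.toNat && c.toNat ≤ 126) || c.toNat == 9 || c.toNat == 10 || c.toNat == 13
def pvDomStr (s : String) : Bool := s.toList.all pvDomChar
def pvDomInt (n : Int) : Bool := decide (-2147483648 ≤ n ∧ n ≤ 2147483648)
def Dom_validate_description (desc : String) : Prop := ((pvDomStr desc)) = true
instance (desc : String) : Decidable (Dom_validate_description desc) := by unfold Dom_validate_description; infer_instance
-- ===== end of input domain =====

-- B replaces the per-pattern membership loop by a single left-to-right pass over positions,
-- checking at each position whether any pattern starts there (alternative, same cost).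

def pvInjectionPatterns : List String :=
  ["ignore previous", "ignore above", "system:", "[inst]", "you are now",
   "forget everything", "<|im_start|>", "do not follow", "disregard", "override"]

-- ===== PORT A =====
-- A's 'for pattern in INJECTION_PATTERNS: if pattern in lower: return …'
def pvCheckA (lower : String) : List String → Option String
  | [] => none
  | p :: ps =>
    if PySem.Str.isIn p lower then some "Description contains prohibited pattern"
    else pvCheckA lower ps

def validate_description (desc : String) : Option String :=
  if 2000 < PySem.Str.len desc then some "Description exceeds 2000 character limit"
  else pvCheckA (PySem.Str.lower desc) pvInjectionPatterns

-- ===== PORT B =====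
def pvPatternLists : List (List Char) := pvInjectionPatterns.map String.toList

-- B's 'any(lower.startswith(_PATTERNS, i) for i in range(len(lower)))':
-- one pass over positions; position i is the suffix starting at i.
def pvScan : List Char → Bool
  | [] => false
  | c :: rest =>
    pvPatternLists.any (fun p => PySem.Chars.startswith (c :: rest) p) || pvScan rest

def validate_description_alt (desc : String) : Option String :=
  if 2000 < PySem.Str.len desc then some "Description exceeds 2000 character limit"
  else if pvScan (PySem.Str.lower desc).toList then
    some "Description contains prohibited pattern"
  else none

-- ===== PRECONDITION & SPEC =====
def Spec_validate_description (desc : String) (out : Option String) : Prop := out = validate_description_alt desc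
instance (desc : String) (out : Option String) : Decidable (Spec_validate_description desc out) := by unfold Spec_validate_description; infer_instance

-- ===== CLAIM (what is proved, stated in full; the proofs are below) =====
def Claim_equal_validate_description : Prop := ∀ (desc : String), Dom_validate_description desc → Spec_validate_description desc (validate_description desc)

-- ===== LEMMAS AND PROOFS =====

-- the position-wise scan finds exactly the patterns occurring as substrings
lemma pvScan_iff (s : List Char) :
    pvScan s = true ↔ ∃ p ∈ pvPatternLists, p <:+: s := by
  induction s with
  | nil =>
    simp only [pvScan, Bool.false_eq_true, false_iff]
    rintro ⟨p, hp, hinf⟩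
    have := List.eq_nil_of_infix_nil hinf
    subst this
    revert hp; decide
  | cons c rest ih =>
    simp only [pvScan, Bool.or_eq_true, List.any_eq_true,
      PySem.Chars.startswith_iff, ih, List.infix_cons_iff]
    constructor
    · rintro (⟨p, hp, hx⟩ | ⟨p, hp, hx⟩)
      exacts [⟨p, hp, Or.inl hx⟩, ⟨p, hp, Or.inr hx⟩]
    · rintro ⟨p, hp, hx | hx⟩
      exacts [Or.inl ⟨p, hp, hx⟩, Or.inr ⟨p, hp, hx⟩]

-- A's early-return loop returns the constant message iff some pattern matches
lemma pvCheckA_eq (lower : String) (ps : List String) :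
    pvCheckA lower ps =
      (if ps.any (fun p => PySem.Str.isIn p lower) then
        some "Description contains prohibited pattern" else none) := by
  induction ps with
  | nil => simp [pvCheckA]
  | cons p ps ih =>
    simp only [pvCheckA, List.any_cons, ih, Bool.or_eq_true]
    split_ifs <;> tauto

theorem pv_main (desc : String) :
    validate_description desc = validate_description_alt desc := by
  unfold validate_description validate_description_alt
  by_cases h : 2000 < PySem.Str.len desc
  · rw [if_pos h, if_pos h]
  · rw [if_neg h, if_neg h, pvCheckA_eq]
    have hb : pvInjectionPatterns.any (fun p => PySem.Str.isIn p (PySem.Str.lower desc))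
        = pvScan (PySem.Str.lower desc).toList := by
      rw [Bool.eq_iff_iff, pvScan_iff]
      simp only [List.any_eq_true, pvPatternLists, List.mem_map,
        PySem.Str.isIn_iff_infix]
      constructor
      · rintro ⟨p, hp, hinf⟩
        exact ⟨p.toList, ⟨p, hp, rfl⟩, hinf⟩
      · rintro ⟨q, ⟨p, hp, rfl⟩, hinf⟩
        exact ⟨p, hp, hinf⟩
    rw [hb]

-- ===== VERDICT (by name: the statement is the Claim_ definition above) =====
theorem validate_description_spec : Claim_equal_validate_description := by
  intro desc _
  exact pv_main desc
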